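-- pv_equiv track=rewrite | github.com/nohe427/ds-proj1 | Task4.py | identifyTelemarketers
-- ===== SOURCE A (Python) =====
-- def identifyTelemarketers(calls: list, texts: list) -> set:
--     outgoingCallsOnly = set()
--     incomingCallsOnly = set()
--     for call in calls:
--         dialer = call[0]
--         number = call[1]
--         outgoingCallsOnly.add(dialer)
--         incomingCallsOnly.add(number)
--     for text in texts:
--         dialer = text[0]
--         number = text[1]
--         outgoingCallsOnly.discard(dialer)
--         outgoingCallsOnly.discard(number)
--     for incomingCall in incomingCallsOnly:
--         outgoingCallsOnly.discard(incomingCall)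
--     sortedTelemarkteres = sorted(outgoingCallsOnly)
--     return sortedTelemarkteres
-- ===== SOURCE B (Python) =====
-- def identifyTelemarketers(calls: list, texts: list) -> list:
--     # Sort-then-scan: tag every appearance as a caller event (0) or a
--     # disqualifying event (1), sort events by number, and emit each
--     # contiguous group that contains a 0-event and no 1-event.
--     events = []
--     for c in calls:
--         events.append((c[0], 0))
--         events.append((c[1], 1))
--     for t in texts:
--         events.append((t[0], 1))
--         events.append((t[1], 1))
--     events.sort(key=lambda e: e[0])
--     res = []
--     i = 0
--     n = len(events)
--     while i < n:
--         num = events[i][0]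
--         good = False
--         bad = False
--         while i < n and events[i][0] == num:
--             if events[i][1] == 0:
--                 good = True
--             else:
--                 bad = True
--             i += 1
--         if good and not bad:
--             res.append(num)
--     return res
-- ===== Notes on version B (the rewrite author's own statement) =====
-- stated objective: alternative
-- what changed: A builds two membership sets and subtracts with repeated set.discard passes; B instead tags every appearance as a (number, 0/1) event, sorts the event list by number, and scans contiguous groups once, emitting each group that has a caller event and no disqualifying event (the scan output is sorted by construction, so no final sorted(set) is needed).
import Mathlib
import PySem

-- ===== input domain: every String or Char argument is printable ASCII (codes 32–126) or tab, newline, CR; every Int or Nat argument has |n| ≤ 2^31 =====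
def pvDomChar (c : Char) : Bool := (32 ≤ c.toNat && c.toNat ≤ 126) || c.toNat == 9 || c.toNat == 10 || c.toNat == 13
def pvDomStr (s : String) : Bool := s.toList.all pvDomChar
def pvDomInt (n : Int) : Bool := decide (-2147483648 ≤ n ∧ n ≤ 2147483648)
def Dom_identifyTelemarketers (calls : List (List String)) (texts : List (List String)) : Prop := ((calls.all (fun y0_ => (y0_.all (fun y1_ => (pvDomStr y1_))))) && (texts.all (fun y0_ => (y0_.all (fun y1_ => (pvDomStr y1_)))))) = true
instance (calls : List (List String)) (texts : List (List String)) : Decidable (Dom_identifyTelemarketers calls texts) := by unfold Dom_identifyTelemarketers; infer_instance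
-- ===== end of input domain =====

-- B replaces A's set-subtraction approach (two membership sets, repeated set.discard) by a
-- sort-then-scan: tag every appearance as a 0/1 event, sort events by number, and scan
-- contiguous groups emitting the caller-only ones; 'alternative' objective, same asymptotics.


-- ===== PORT A =====
def identifyTelemarketers (calls : List (List String)) (texts : List (List String)) : List String :=
  let sets := calls.foldl
    (fun (p : PySem.Set String × PySem.Set String) call =>
      (PySem.Set.add p.1 (PySem.List.pyGetD call 0 ""),
       PySem.Set.add p.2 (PySem.List.pyGetD call 1 "")))
    (PySem.Set.empty, PySem.Set.empty)
  let afterTexts := texts.foldl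
    (fun s text =>
      PySem.Set.discard (PySem.Set.discard s (PySem.List.pyGetD text 0 ""))
        (PySem.List.pyGetD text 1 ""))
    sets.1
  let outgoing := sets.2.foldl (fun s x => PySem.Set.discard s x) afterTexts
  PySem.List.sorted outgoing (fun x => x) false

-- ===== PORT B =====
-- the inner while loop of Source B: consume the events of the current group, OR-ing the flags;
-- the outer while loop's restart at a new number is the 'else' branch
def pvGroup (num : String) (good bad : Bool) : List (String × Int) → List String
  | [] => if good && !bad then [num] else []
  | (n, t) :: rest =>
    if n = num then pvGroup num (good || t == 0) (bad || !(t == 0)) rest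
    else (if good && !bad then [num] else []) ++ pvGroup n (t == 0) (!(t == 0)) rest

def pvScan : List (String × Int) → List String
  | [] => []
  | (n, t) :: rest => pvGroup n (t == 0) (!(t == 0)) rest

def identifyTelemarketers_alt (calls : List (List String)) (texts : List (List String)) : List String :=
  let events := texts.foldl
    (fun acc text => acc ++ [(PySem.List.pyGetD text 0 "", (1 : Int)),
                             (PySem.List.pyGetD text 1 "", (1 : Int))])
    (calls.foldl
      (fun acc call => acc ++ [(PySem.List.pyGetD call 0 "", (0 : Int)),
                               (PySem.List.pyGetD call 1 "", (1 : Int))])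
      [])
  pvScan (PySem.List.sorted events (fun e => e.1) false)

-- ===== PRECONDITION & SPEC =====
-- Pre_ excludes exactly the inputs where Python A raises IndexError: a call or text row with fewer than 2 entries.
def Pre_identifyTelemarketers (calls : List (List String)) (texts : List (List String)) : Prop :=
  (∀ c ∈ calls, 2 ≤ c.length) ∧ (∀ t ∈ texts, 2 ≤ t.length)
instance (calls : List (List String)) (texts : List (List String)) : Decidable (Pre_identifyTelemarketers calls texts) := by unfold Pre_identifyTelemarketers; infer_instance
def pvWitness_identifyTelemarketers : List (List String) × List (List String) :=
  ([["1", "2"], ["3", "2"]], [["3", "4"]])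
def Spec_identifyTelemarketers (calls : List (List String)) (texts : List (List String)) (out : List String) : Prop := out = identifyTelemarketers_alt calls texts
instance (calls : List (List String)) (texts : List (List String)) (out : List String) : Decidable (Spec_identifyTelemarketers calls texts out) := by unfold Spec_identifyTelemarketers; infer_instance

-- ===== CLAIM (what is proved, stated in full; the proofs are below) =====
def Claim_equal_identifyTelemarketers : Prop := ∀ (calls : List (List String)) (texts : List (List String)), Dom_identifyTelemarketers calls texts → Pre_identifyTelemarketers calls texts → Spec_identifyTelemarketers calls texts (identifyTelemarketers calls texts)

-- ===== LEMMAS AND PROOFS =====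

-- the lists of first / second entries of the rows, and the numbers appearing in texts
def pvCallers (calls : List (List String)) : List String :=
  calls.map (fun c => PySem.List.pyGetD c 0 "")
def pvRecvrs (calls : List (List String)) : List String :=
  calls.map (fun c => PySem.List.pyGetD c 1 "")
def pvTextN (texts : List (List String)) : List String :=
  texts.flatMap (fun t => [PySem.List.pyGetD t 0 "", PySem.List.pyGetD t 1 ""])

-- x has a caller (tag-0) / disqualifying (tag-nonzero) event in l
def pvG (x : String) (l : List (String × Int)) : Prop := ∃ p ∈ l, p.1 = x ∧ p.2 = 0
def pvB (x : String) (l : List (String × Int)) : Prop := ∃ p ∈ l, p.1 = x ∧ p.2 ≠ 0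

-- ===== A-side lemmas =====
theorem pvA_pairfold (calls : List (List String)) (s1 s2 : PySem.Set String) :
    calls.foldl
      (fun (p : PySem.Set String × PySem.Set String) call =>
        (PySem.Set.add p.1 (PySem.List.pyGetD call 0 ""),
         PySem.Set.add p.2 (PySem.List.pyGetD call 1 "")))
      (s1, s2)
    = (PySem.Set.update s1 (pvCallers calls), PySem.Set.update s2 (pvRecvrs calls)) := by
  induction calls generalizing s1 s2 with
  | nil => simp [pvCallers, pvRecvrs, PySem.Set.update]
  | cons c l ih =>
      simp only [List.foldl_cons, ih, pvCallers, pvRecvrs, List.map_cons,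
        PySem.Set.update_cons]

theorem pvA_textfold_mem (texts : List (List String)) (s : PySem.Set String) (x : String) :
    x ∈ texts.foldl
      (fun s text =>
        PySem.Set.discard (PySem.Set.discard s (PySem.List.pyGetD text 0 ""))
          (PySem.List.pyGetD text 1 "")) s
    ↔ x ∈ s ∧ x ∉ pvTextN texts := by
  induction texts generalizing s with
  | nil => simp [pvTextN]
  | cons t l ih =>
      simp only [List.foldl_cons, ih, PySem.Set.mem_discard, pvTextN, List.flatMap_cons,
        List.mem_append, List.mem_cons]
      tauto

theorem pvA_textfold_nodup (texts : List (List String)) (s : PySem.Set String)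
    (h : s.Nodup) :
    (texts.foldl
      (fun s text =>
        PySem.Set.discard (PySem.Set.discard s (PySem.List.pyGetD text 0 ""))
          (PySem.List.pyGetD text 1 "")) s).Nodup := by
  induction texts generalizing s with
  | nil => exact h
  | cons t l ih =>
      exact ih _ (PySem.Set.nodup_discard _ _ (PySem.Set.nodup_discard _ _ h))

theorem pvA_discfold_mem (l : List String) (s : PySem.Set String) (x : String) :
    x ∈ l.foldl (fun s y => PySem.Set.discard s y) s ↔ x ∈ s ∧ x ∉ l := by
  induction l generalizing s with
  | nil => simp
  | cons y l ih =>
      simp only [List.foldl_cons, ih, PySem.Set.mem_discard, List.mem_cons]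
      tauto

theorem pvA_discfold_nodup (l : List String) (s : PySem.Set String) (h : s.Nodup) :
    (l.foldl (fun s y => PySem.Set.discard s y) s).Nodup := by
  induction l generalizing s with
  | nil => exact h
  | cons y l ih => exact ih _ (PySem.Set.nodup_discard _ _ h)

-- ===== B-side lemmas =====
-- membership in a scanned group, for a tail sorted by number and bounded below by num
theorem pvG_cons (x n : String) (t : Int) (l : List (String × Int)) :
    pvG x ((n, t) :: l) ↔ (n = x ∧ t = 0) ∨ pvG x l := by
  simp [pvG]

theorem pvB_cons (x n : String) (t : Int) (l : List (String × Int)) :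
    pvB x ((n, t) :: l) ↔ (n = x ∧ t ≠ 0) ∨ pvB x l := by
  simp [pvB]

theorem pvG_le (x : String) (l : List (String × Int)) (b : String)
    (hb : ∀ p ∈ l, b ≤ p.1) (h : pvG x l) : b ≤ x := by
  obtain ⟨p, hp, h1, _⟩ := h
  exact h1 ▸ hb p hp

theorem pvGroup_mem (num : String) (good bad : Bool) (rest : List (String × Int))
    (hle : ∀ p ∈ rest, num ≤ p.1) (hs : rest.Pairwise (fun a b => a.1 ≤ b.1)) (x : String) :
    x ∈ pvGroup num good bad rest ↔
      (x = num ∧ (good = true ∨ pvG num rest) ∧ ¬(bad = true ∨ pvB num rest))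
      ∨ (num < x ∧ pvG x rest ∧ ¬ pvB x rest) := by
  induction rest generalizing num good bad with
  | nil =>
      cases good <;> cases bad <;> simp [pvGroup, pvG, pvB]
  | cons p rest ih =>
      obtain ⟨n, t⟩ := p
      rw [List.pairwise_cons] at hs
      obtain ⟨hn_rest, hs'⟩ := hs
      simp only [pvGroup]
      by_cases hn : n = num
      · subst hn
        rw [if_pos rfl, ih _ _ _ (fun p hp => hle p (List.mem_cons_of_mem _ hp)) hs']
        simp only [pvG_cons, pvB_cons, Bool.or_eq_true, beq_iff_eq,
          Bool.not_eq_eq_eq_not, Bool.not_true, ne_eq]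
        by_cases hx : x = n
        · subst hx
          simp only [lt_irrefl, false_and, or_false]
          by_cases ht : t = 0 <;> simp [ht]
        · simp only [hx, false_and, false_or]
          constructor
          · rintro ⟨hlt, hG, hB⟩
            refine ⟨hlt, Or.inr hG, ?_⟩
            rintro (⟨he, _⟩ | h)
            · exact hx he.symm
            · exact hB h
          · rintro ⟨hlt, hG | hG, hB⟩
            · exact absurd hG.1.symm hx
            · exact ⟨hlt, hG, fun h => hB (Or.inr h)⟩
      · have hnum_lt : num < n :=
          lt_of_le_of_ne (hle (n, t) (List.mem_cons_self)) (Ne.symm hn)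
        rw [if_neg hn, List.mem_append,
          ih n (t == 0) (!(t == 0)) hn_rest hs']
        have hGnum : ¬ pvG num rest := by
          rintro ⟨p, hp, h1, _⟩
          exact absurd (h1 ▸ hn_rest p hp) (not_le_of_gt hnum_lt)
        have hBnum : ¬ pvB num rest := by
          rintro ⟨p, hp, h1, _⟩
          exact absurd (h1 ▸ hn_rest p hp) (not_le_of_gt hnum_lt)
        simp only [pvG_cons, pvB_cons, beq_iff_eq, Bool.not_eq_true',
          beq_eq_false_iff_ne, ne_eq]
        by_cases hx : x = num
        · subst hx
          have h1 : ¬ x < x := lt_irrefl x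
          have h2 : ¬ (n = x ∧ t = 0) := fun h => hn h.1
          have h3 : ¬ (n = x ∧ ¬ t = 0) := fun h => hn h.1
          have h4 : ¬ x < n → False := fun h => h hnum_lt
          have h5 : ¬ n < x := fun h => lt_asymm hnum_lt h
          have h6 : x ≠ n := fun h => hn h.symm
          cases good <;> cases bad <;>
            simp [h2, h3, h5, h6, hGnum, hBnum]
        · have hmemif : x ∉ (if good && !bad then [num] else []) := by
            split <;> simp [hx]
          simp only [hmemif, false_or, hx, false_and]
          by_cases hxn : x = n
          · subst hxn
            simp only [lt_irrefl, false_and, or_false, hnum_lt, true_and]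
          · have h7 : ¬ (n = x ∧ t = 0) := fun h => hxn h.1.symm
            have h8 : ¬ (n = x ∧ ¬ t = 0) := fun h => hxn h.1.symm
            simp only [hxn, false_and, false_or, h7, h8]
            constructor
            · rintro ⟨hlt, hG, hB⟩
              exact ⟨lt_trans hnum_lt hlt, hG, hB⟩
            · rintro ⟨_, hG, hB⟩
              exact ⟨lt_of_le_of_ne (pvG_le x rest n hn_rest hG)
                (fun h => hxn h.symm), hG, hB⟩

theorem pvGroup_pairwise (num : String) (good bad : Bool) (rest : List (String × Int))
    (hle : ∀ p ∈ rest, num ≤ p.1) (hs : rest.Pairwise (fun a b => a.1 ≤ b.1)) :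
    (pvGroup num good bad rest).Pairwise (· < ·) := by
  induction rest generalizing num good bad with
  | nil =>
      simp only [pvGroup]
      split <;> simp
  | cons p rest ih =>
      obtain ⟨n, t⟩ := p
      rw [List.pairwise_cons] at hs
      obtain ⟨hn_rest, hs'⟩ := hs
      simp only [pvGroup]
      by_cases hn : n = num
      · subst hn
        rw [if_pos rfl]
        exact ih _ _ _ (fun p hp => hle p (List.mem_cons_of_mem _ hp)) hs'
      · have hnum_lt : num < n :=
          lt_of_le_of_ne (hle (n, t) (List.mem_cons_self)) (Ne.symm hn)
        rw [if_neg hn]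
        refine List.pairwise_append.mpr ⟨?_, ih n _ _ hn_rest hs', ?_⟩
        · split <;> simp
        · intro a ha b hb
          have ha' : a = num := by
            revert ha; split <;> simp_all
          subst ha'
          rcases (pvGroup_mem n _ _ rest hn_rest hs' b).mp hb with ⟨rfl, _⟩ | ⟨h, _⟩
          · exact hnum_lt
          · exact lt_trans hnum_lt h

theorem pvScan_mem (l : List (String × Int)) (hs : l.Pairwise (fun a b => a.1 ≤ b.1))
    (x : String) : x ∈ pvScan l ↔ pvG x l ∧ ¬ pvB x l := by
  cases l with
  | nil => simp [pvScan, pvG, pvB]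
  | cons p rest =>
      obtain ⟨n, t⟩ := p
      rw [List.pairwise_cons] at hs
      obtain ⟨hn_rest, hs'⟩ := hs
      rw [pvScan, pvGroup_mem n _ _ rest hn_rest hs' x]
      simp only [pvG_cons, pvB_cons, beq_iff_eq, beq_eq_false_iff_ne,
        Bool.not_eq_true', ne_eq]
      by_cases hx : x = n
      · subst hx
        simp only [lt_irrefl, false_and, or_false]
        tauto
      · have h7 : ¬ (n = x ∧ t = 0) := fun h => hx h.1.symm
        have h8 : ¬ (n = x ∧ ¬ t = 0) := fun h => hx h.1.symm
        simp only [hx, false_and, false_or, h7, h8]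
        constructor
        · rintro ⟨_, hG, hB⟩
          exact ⟨hG, hB⟩
        · rintro ⟨hG, hB⟩
          exact ⟨lt_of_le_of_ne (pvG_le x rest n hn_rest hG)
            (fun h => hx h.symm), hG, hB⟩

theorem pvScan_pairwise (l : List (String × Int)) (hs : l.Pairwise (fun a b => a.1 ≤ b.1)) :
    (pvScan l).Pairwise (· < ·) := by
  cases l with
  | nil => simp [pvScan]
  | cons p rest =>
      obtain ⟨n, t⟩ := p
      rw [List.pairwise_cons] at hs
      exact pvGroup_pairwise n _ _ rest hs.1 hs.2

-- the events list, by name, and its membership split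
theorem pvEvents_eq (calls texts : List (List String)) :
    texts.foldl
      (fun acc text => acc ++ [(PySem.List.pyGetD text 0 "", (1 : Int)),
                               (PySem.List.pyGetD text 1 "", (1 : Int))])
      (calls.foldl
        (fun acc call => acc ++ [(PySem.List.pyGetD call 0 "", (0 : Int)),
                                 (PySem.List.pyGetD call 1 "", (1 : Int))])
        [])
    = calls.flatMap (fun call => [(PySem.List.pyGetD call 0 "", (0 : Int)),
                                  (PySem.List.pyGetD call 1 "", (1 : Int))])
      ++ texts.flatMap (fun text => [(PySem.List.pyGetD text 0 "", (1 : Int)),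
                                     (PySem.List.pyGetD text 1 "", (1 : Int))]) := by
  rw [PySem.List.foldl_append_eq_flatMap, PySem.List.foldl_append_eq_flatMap]
  simp

theorem pvG_events (calls texts : List (List String)) (x : String) :
    pvG x (calls.flatMap (fun call => [(PySem.List.pyGetD call 0 "", (0 : Int)),
                                       (PySem.List.pyGetD call 1 "", (1 : Int))])
          ++ texts.flatMap (fun text => [(PySem.List.pyGetD text 0 "", (1 : Int)),
                                         (PySem.List.pyGetD text 1 "", (1 : Int))]))
    ↔ x ∈ pvCallers calls := by
  simp only [pvG, pvCallers, List.mem_append, List.mem_flatMap, List.mem_map]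
  constructor
  · rintro ⟨p, hp | hp, hx, h0⟩
    · obtain ⟨c, hc, hp⟩ := hp
      simp only [List.mem_cons] at hp
      rcases hp with rfl | rfl | h
      · exact ⟨c, hc, hx⟩
      · simp at h0
      · simp at h
    · obtain ⟨t, _, hp⟩ := hp
      simp only [List.mem_cons] at hp
      rcases hp with rfl | rfl | h
      · simp at h0
      · simp at h0
      · simp at h
  · rintro ⟨c, hc, hx⟩
    exact ⟨(PySem.List.pyGetD c 0 "", 0), Or.inl ⟨c, hc, by simp⟩, hx, rfl⟩

theorem pvB_events (calls texts : List (List String)) (x : String) :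
    pvB x (calls.flatMap (fun call => [(PySem.List.pyGetD call 0 "", (0 : Int)),
                                       (PySem.List.pyGetD call 1 "", (1 : Int))])
          ++ texts.flatMap (fun text => [(PySem.List.pyGetD text 0 "", (1 : Int)),
                                         (PySem.List.pyGetD text 1 "", (1 : Int))]))
    ↔ x ∈ pvRecvrs calls ∨ x ∈ pvTextN texts := by
  simp only [pvB, pvRecvrs, pvTextN, List.mem_append, List.mem_flatMap, List.mem_map,
    List.mem_cons]
  constructor
  · rintro ⟨p, hp | hp, hx, h0⟩
    · obtain ⟨c, hc, hp⟩ := hp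
      rcases hp with rfl | rfl | h
      · simp at h0
      · exact Or.inl ⟨c, hc, hx⟩
      · simp at h
    · obtain ⟨t, ht, hp⟩ := hp
      rcases hp with rfl | rfl | h
      · exact Or.inr ⟨t, ht, Or.inl hx.symm⟩
      · exact Or.inr ⟨t, ht, Or.inr (Or.inl hx.symm)⟩
      · simp at h
  · rintro (⟨c, hc, hx⟩ | ⟨t, ht, hx | hx | h⟩)
    · exact ⟨(PySem.List.pyGetD c 1 "", 1), Or.inl ⟨c, hc, by simp⟩, hx, by simp⟩
    · exact ⟨(PySem.List.pyGetD t 0 "", 1), Or.inr ⟨t, ht, by simp⟩, hx.symm, by simp⟩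
    · exact ⟨(PySem.List.pyGetD t 1 "", 1), Or.inr ⟨t, ht, by simp⟩, hx.symm, by simp⟩
    · simp at h

-- pvG/pvB only see membership, so they transfer along a permutation
theorem pvG_perm {l₁ l₂ : List (String × Int)} (h : l₁.Perm l₂) (x : String) :
    pvG x l₁ ↔ pvG x l₂ := by
  unfold pvG; constructor <;> rintro ⟨p, hp, h2⟩
  · exact ⟨p, (h.mem_iff).mp hp, h2⟩
  · exact ⟨p, (h.mem_iff).mpr hp, h2⟩

theorem pvB_perm {l₁ l₂ : List (String × Int)} (h : l₁.Perm l₂) (x : String) :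
    pvB x l₁ ↔ pvB x l₂ := by
  unfold pvB; constructor <;> rintro ⟨p, hp, h2⟩
  · exact ⟨p, (h.mem_iff).mp hp, h2⟩
  · exact ⟨p, (h.mem_iff).mpr hp, h2⟩

-- ===== VERDICT (by name: the statement is the Claim_ definition above) =====
theorem identifyTelemarketers_spec : Claim_equal_identifyTelemarketers := by
  intro calls texts _ _
  show identifyTelemarketers calls texts = identifyTelemarketers_alt calls texts
  unfold identifyTelemarketers identifyTelemarketers_alt
  simp only [pvA_pairfold, pvEvents_eq]
  set ev := calls.flatMap (fun call => [(PySem.List.pyGetD call 0 "", (0 : Int)),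
              (PySem.List.pyGetD call 1 "", (1 : Int))])
            ++ texts.flatMap (fun text => [(PySem.List.pyGetD text 0 "", (1 : Int)),
              (PySem.List.pyGetD text 1 "", (1 : Int))]) with hev
  have hsort : (PySem.List.sorted ev (fun e => e.1) false).Pairwise (fun a b => a.1 ≤ b.1) :=
    PySem.List.sorted_pairwise ev (fun e => e.1)
  have hperm := PySem.List.sorted_perm ev (fun e => e.1) false
  have hBpw : (pvScan (PySem.List.sorted ev (fun e => e.1) false)).Pairwise (· < ·) :=
    pvScan_pairwise _ hsort
  have hBmem : ∀ x, x ∈ pvScan (PySem.List.sorted ev (fun e => e.1) false) ↔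
      x ∈ pvCallers calls ∧ ¬(x ∈ pvRecvrs calls ∨ x ∈ pvTextN texts) := by
    intro x
    rw [pvScan_mem _ hsort, pvG_perm hperm, pvB_perm hperm, pvG_events, pvB_events]
  simp only [PySem.Set.empty]
  apply PySem.List.sorted_eq_of_perm_of_pairwise_lt
  · rw [List.perm_ext_iff_of_nodup (hBpw.imp (fun h => ne_of_lt h))
      (pvA_discfold_nodup _ _ (pvA_textfold_nodup _ _
        (PySem.Set.nodup_update _ _ List.nodup_nil)))]
    intro x
    rw [hBmem, pvA_discfold_mem, pvA_textfold_mem]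
    simp only [PySem.Set.mem_update, List.not_mem_nil, false_or]
    tauto
  · exact hBpw
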